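-- pv_equiv track=rewrite | github.com/TDoGoodT/poly-sim | utils.py | calc_curve
-- ===== SOURCE A (Python) =====
-- def calc_curve(poly):
--     x = []
--     y = []
--     curr_x = 0
--     curr_y = 0
--     for sig in poly:
--         curr_x += sig[0]
--         curr_y += sig[1]
--         x.append(curr_x)
--         y.append(curr_y)
--     return x , y
-- ===== SOURCE B (Python) =====
-- def _prefix(vals):
--     total = 0
--     out = []
--     for v in vals:
--         total += v
--         out.append(total)
--     return out
--
-- def calc_curve(poly):
--     return _prefix(s[0] for s in poly), _prefix(s[1] for s in poly)
-- ===== Notes on version B (the rewrite author's own statement) =====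
-- stated objective: simpler
-- what changed: Replaces the single interleaved loop maintaining four pieces of state with a small prefix-sum helper applied once per coordinate column, so each stream is computed independently in its own pass.
import Mathlib
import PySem

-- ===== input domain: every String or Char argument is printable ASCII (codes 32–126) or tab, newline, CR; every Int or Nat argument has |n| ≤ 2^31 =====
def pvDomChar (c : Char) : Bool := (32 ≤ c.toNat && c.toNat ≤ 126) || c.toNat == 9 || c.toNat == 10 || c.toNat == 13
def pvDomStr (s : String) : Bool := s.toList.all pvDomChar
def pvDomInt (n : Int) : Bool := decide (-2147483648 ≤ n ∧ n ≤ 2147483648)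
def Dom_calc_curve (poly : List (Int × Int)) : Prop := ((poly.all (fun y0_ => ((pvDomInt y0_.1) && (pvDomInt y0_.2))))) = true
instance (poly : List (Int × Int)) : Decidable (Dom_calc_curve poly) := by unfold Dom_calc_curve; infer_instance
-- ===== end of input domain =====

-- B computes each coordinate's running sums in its own prefix-sum pass instead of A's
-- single interleaved loop with four pieces of state (objective: simpler decomposition).

-- ===== PORT A =====
-- one loop over poly, state = ((x, y), (curr_x, curr_y)), appending to both lists
def calc_curve (poly : List (Int × Int)) : List Int × List Int :=
  (poly.foldl
    (fun (st : (List Int × List Int) × Int × Int) sig =>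
      ((st.1.1 ++ [st.2.1 + sig.1], st.1.2 ++ [st.2.2 + sig.2]),
       (st.2.1 + sig.1, st.2.2 + sig.2)))
    (([], []), (0, 0))).1

-- ===== PORT B =====
-- _prefix: running-sum loop over one column (total, out)
def pvPrefix (vals : List Int) : List Int :=
  (vals.foldl (fun (st : Int × List Int) v => (st.1 + v, st.2 ++ [st.1 + v])) (0, [])).2

def calc_curve_alt (poly : List (Int × Int)) : List Int × List Int :=
  (pvPrefix (poly.map (fun s => s.1)), pvPrefix (poly.map (fun s => s.2)))

-- ===== PRECONDITION & SPEC =====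
def Spec_calc_curve (poly : List (Int × Int)) (out : List Int × List Int) : Prop := out = calc_curve_alt poly
instance (poly : List (Int × Int)) (out : List Int × List Int) : Decidable (Spec_calc_curve poly out) := by unfold Spec_calc_curve; infer_instance

-- ===== CLAIM (what is proved, stated in full; the proofs are below) =====
def Claim_equal_calc_curve : Prop := ∀ (poly : List (Int × Int)), Dom_calc_curve poly → Spec_calc_curve poly (calc_curve poly)

-- ===== LEMMAS AND PROOFS =====

-- reference: prefix sums of l starting from running total c
def pvRef (l : List Int) (c : Int) : List Int :=
  match l with
  | [] => []
  | v :: r => (c + v) :: pvRef r (c + v)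

theorem pvPrefix_general (vals : List Int) (c : Int) (out : List Int) :
    (vals.foldl (fun (st : Int × List Int) v => (st.1 + v, st.2 ++ [st.1 + v])) (c, out)).2
      = out ++ pvRef vals c := by
  induction vals generalizing c out with
  | nil => simp [pvRef]
  | cons v r ih => simp [List.foldl, pvRef, ih]

theorem calcA_general (poly : List (Int × Int)) (x y : List Int) (cx cy : Int) :
    (poly.foldl
      (fun (st : (List Int × List Int) × Int × Int) sig =>
        ((st.1.1 ++ [st.2.1 + sig.1], st.1.2 ++ [st.2.2 + sig.2]),
         (st.2.1 + sig.1, st.2.2 + sig.2)))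
      ((x, y), (cx, cy))).1
      = (x ++ pvRef (poly.map (fun s => s.1)) cx, y ++ pvRef (poly.map (fun s => s.2)) cy) := by
  induction poly generalizing x y cx cy with
  | nil => simp [pvRef]
  | cons s r ih => simp [List.foldl, pvRef, ih]

-- ===== VERDICT (by name: the statement is the Claim_ definition above) =====
theorem calc_curve_spec : Claim_equal_calc_curve := by
  intro poly _
  show calc_curve poly = calc_curve_alt poly
  simp [calc_curve, calc_curve_alt, pvPrefix, calcA_general, pvPrefix_general]
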